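-- pv_equiv track=rewrite | github.com/FJayD89/misc-sync | coding/ProjectEuler/projectEuler.py | is_permuted
-- ===== SOURCE A (Python) =====
-- def is_permuted(num1, num2):
-- 	str_num1 = str(num1)
-- 	str_num2 = str(num2)
-- 	if len(str_num1) != len(str_num2):
-- 		return False
-- 	digits = {digit:0 for digit in str_num1}
-- 	for digit in str_num1:
-- 		digits[digit] += 1
-- 	for digit in str_num2:
-- 		if not digit in digits:
-- 			return False
-- 		digits[digit] -= 1
-- 	for digitCount in digits.values():
-- 		if digitCount != 0:
-- 			return False
-- 	return True
-- ===== SOURCE B (Python) =====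
-- def is_permuted(num1, num2):
-- 	return sorted(str(num1)) == sorted(str(num2))
-- ===== Notes on version B (the rewrite author's own statement) =====
-- stated objective: simpler
-- what changed: Replaces the length guard plus count-dict build/decrement/zero-check with a single sort-and-compare of the two digit strings.
import Mathlib
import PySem

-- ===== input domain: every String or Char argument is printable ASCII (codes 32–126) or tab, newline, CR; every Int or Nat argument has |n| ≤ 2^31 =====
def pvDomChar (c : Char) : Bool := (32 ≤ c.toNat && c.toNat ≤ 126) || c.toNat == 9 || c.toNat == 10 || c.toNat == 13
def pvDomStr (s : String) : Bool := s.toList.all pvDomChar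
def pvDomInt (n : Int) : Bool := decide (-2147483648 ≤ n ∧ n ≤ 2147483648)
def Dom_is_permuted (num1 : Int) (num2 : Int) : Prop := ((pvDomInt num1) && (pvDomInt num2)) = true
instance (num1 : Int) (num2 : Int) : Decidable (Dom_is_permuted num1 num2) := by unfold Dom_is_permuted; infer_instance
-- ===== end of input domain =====

-- B replaces the count-dict build/decrement/zero-check with a single sort-and-compare; objective: simpler.

-- ===== PORT A =====
-- the second loop of A: early-return False on a digit absent from the dict, else decrement
def pvLoopA (d : PySem.Dict Char Int) : List Char → Option (PySem.Dict Char Int)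
  | [] => some d
  | c :: cs =>
    if d.contains c then pvLoopA (d.modify c 0 (fun v => v - 1)) cs
    else none

def is_permuted (num1 : Int) (num2 : Int) : Bool :=
  let str_num1 := PySem.Int.toChars num1
  let str_num2 := PySem.Int.toChars num2
  if str_num1.length ≠ str_num2.length then false
  else
    -- digits = {digit: 0 for digit in str_num1}
    let digits := str_num1.foldl (fun d c => d.insert c 0) PySem.Dict.empty
    -- for digit in str_num1: digits[digit] += 1
    let digits := str_num1.foldl (fun d c => d.modify c 0 (fun v => v + 1)) digits
    match pvLoopA digits str_num2 with
    | none => false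
    | some d => d.values.all (fun v => v == 0)

-- ===== PORT B =====
def is_permuted_alt (num1 : Int) (num2 : Int) : Bool :=
  PySem.List.sorted (PySem.Int.toChars num1) (fun x => x) false ==
  PySem.List.sorted (PySem.Int.toChars num2) (fun x => x) false

-- ===== PRECONDITION & SPEC =====
def Spec_is_permuted (num1 : Int) (num2 : Int) (out : Bool) : Prop := out = is_permuted_alt num1 num2
instance (num1 : Int) (num2 : Int) (out : Bool) : Decidable (Spec_is_permuted num1 num2 out) := by unfold Spec_is_permuted; infer_instance

-- ===== CLAIM (what is proved, stated in full; the proofs are below) =====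
def Claim_equal_is_permuted : Prop := ∀ (num1 : Int) (num2 : Int), Dom_is_permuted num1 num2 → Spec_is_permuted num1 num2 (is_permuted num1 num2)

-- ===== LEMMAS AND PROOFS =====

-- the insert-0 comprehension leaves every getD-at-0 equal to 0
theorem pv_getD_init (l : List Char) (d : PySem.Dict Char Int)
    (h : ∀ k, d.getD k 0 = 0) :
    ∀ k, (l.foldl (fun d c => d.insert c 0) d).getD k 0 = 0 := by
  induction l generalizing d with
  | nil => exact h
  | cons c cs ih =>
    intro k
    apply ih
    intro k'
    rw [PySem.Dict.getD_insert]
    split <;> simp [h]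

-- A's decrement loop succeeds exactly when every char of l is a key; the result
-- keeps the keys and subtracts l.count from every getD-at-0
theorem pvLoopA_some (l : List Char) (d : PySem.Dict Char Int)
    (h : ∀ c ∈ l, d.contains c = true) :
    ∃ d', pvLoopA d l = some d' ∧ d'.keys = d.keys ∧
      ∀ k, d'.getD k 0 = d.getD k 0 - l.count k := by
  induction l generalizing d with
  | nil => exact ⟨d, rfl, rfl, by simp⟩
  | cons c cs ih =>
    have hc : d.contains c = true := h c (by simp)
    have hrest : ∀ x ∈ cs, (d.modify c 0 (fun v => v - 1)).contains x = true := by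
      intro x hx
      rw [PySem.Dict.contains_modify, h x (List.mem_cons_of_mem _ hx)]
      simp
    obtain ⟨d', hd', hkeys, hval⟩ := ih _ hrest
    refine ⟨d', by simp [pvLoopA, hc, hd'], ?_, ?_⟩
    · rw [hkeys, PySem.Dict.keys_modify, PySem.Dict.keys_insert_of_contains _ _ hc]
    · intro k
      rw [hval k, PySem.Dict.getD_modify, List.count_cons]
      by_cases hk : k = c
      · subst hk; simp; ring
      · rw [if_neg hk]
        simp [Ne.symm hk]

theorem pvLoopA_none (l : List Char) (d : PySem.Dict Char Int) (c : Char)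
    (hc : c ∈ l) (hnc : d.contains c = false) : pvLoopA d l = none := by
  induction l generalizing d with
  | nil => simp at hc
  | cons x xs ih =>
    simp only [pvLoopA]
    by_cases hx : d.contains x = true
    · rw [if_pos hx]
      have hcx : c ≠ x := fun e => by rw [e, hx] at hnc; cases hnc
      have hc' : c ∈ xs := by
        rcases List.mem_cons.mp hc with h1 | h1
        · exact absurd h1 hcx
        · exact h1
      refine ih _ hc' ?_
      rw [PySem.Dict.contains_modify]
      simp [hnc, hcx]
    · rw [if_neg hx]

-- characterisation of A: true iff the two char lists are permutations of one another
theorem is_permuted_iff_perm (num1 num2 : Int) :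
    is_permuted num1 num2 = true ↔
      (PySem.Int.toChars num1).Perm (PySem.Int.toChars num2) := by
  simp only [is_permuted]
  set s1 := PySem.Int.toChars num1 with hs1
  set s2 := PySem.Int.toChars num2 with hs2
  set d0 : PySem.Dict Char Int := s1.foldl (fun d c => d.insert c 0) PySem.Dict.empty with hd0
  set d1 : PySem.Dict Char Int := s1.foldl (fun d c => d.modify c 0 (fun v => v + 1)) d0 with hd1
  have hk0 : d0.keys = PySem.Set.ofList s1 := by
    rw [hd0, PySem.Dict.keys_foldl_insert, PySem.Dict.keys_empty]
    simp [PySem.Set.ofList_eq_foldl, PySem.Set.update]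
  have hk1 : d1.keys = PySem.Set.ofList s1 := by
    have hfil : List.filter (fun y => !(PySem.Set.ofList s1).contains y) (PySem.Set.ofList s1) = [] := by
      rw [List.filter_eq_nil_iff]
      intro y hy
      have hcy : (PySem.Set.ofList s1).contains y = true := (PySem.Set.contains_iff _ _).mpr hy
      simp only [hcy, Bool.not_true]
      exact Bool.false_ne_true
    rw [hd1, PySem.Dict.keys_foldl_modify, hk0, PySem.Set.update_eq_append_filter, hfil,
      List.append_nil]
  have hmemk1 : ∀ k, k ∈ d1.keys ↔ k ∈ s1 := by
    intro k; rw [hk1]; exact PySem.Set.mem_ofList _ _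
  have hcont1 : ∀ k, d1.contains k = true ↔ k ∈ s1 := by
    intro k; rw [PySem.Dict.contains_iff_mem_keys]; exact hmemk1 k
  have hnd1 : d1.keys.Nodup := by rw [hk1]; exact PySem.Set.nodup_ofList _
  have hval1 : ∀ k, d1.getD k 0 = s1.count k := by
    intro k
    rw [hd1, PySem.Dict.getD_foldl_modify_add_one,
      pv_getD_init s1 PySem.Dict.empty (fun k => PySem.Dict.getD_empty k 0)]
    simp
  by_cases hlen : s1.length = s2.length
  · simp only [hlen, ne_eq, not_true_eq_false, if_false]
    by_cases hmem : ∀ c ∈ s2, c ∈ s1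
    · obtain ⟨d', hd', hkeys, hval⟩ :=
        pvLoopA_some s2 d1 (fun c hc => (hcont1 c).mpr (hmem c hc))
      rw [hd']
      have hvals : d'.values.all (fun v => v == 0) = true ↔
          ∀ k ∈ d'.keys, d'.getD k 0 = 0 := by
        rw [PySem.Dict.values_eq_map_keys d' (hkeys ▸ hnd1) 0]
        simp [List.all_eq_true]
      constructor
      · intro htrue
        rw [hvals] at htrue
        rw [List.perm_iff_count]
        intro k
        by_cases hk : k ∈ s1
        · have := htrue k (by rw [hkeys]; exact (hmemk1 k).mpr hk)
          rw [hval k, hval1 k] at this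
          omega
        · have h2 : k ∉ s2 := fun h => hk (hmem k h)
          rw [List.count_eq_zero_of_not_mem hk, List.count_eq_zero_of_not_mem h2]
      · intro hperm
        rw [hvals]
        intro k _
        rw [hval k, hval1 k, List.perm_iff_count.mp hperm k]
        omega
    · rw [not_forall] at hmem
      simp only [not_forall, exists_prop] at hmem
      obtain ⟨c, hc2, hc1⟩ := hmem
      have hfalse : d1.contains c = false := by
        cases hcb : d1.contains c
        · rfl
        · exact absurd ((hcont1 c).mp hcb) hc1
      rw [pvLoopA_none s2 d1 c hc2 hfalse]
      constructor
      · intro h; simp at h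
      · intro hperm; exact absurd (hperm.mem_iff.mpr hc2) hc1
  · simp only [hlen, ne_eq, not_false_eq_true, if_true]
    constructor
    · intro h; simp at h
    · intro hperm; exact absurd hperm.length_eq hlen

-- ===== VERDICT (by name: the statement is the Claim_ definition above) =====
theorem is_permuted_spec : Claim_equal_is_permuted := by
  intro num1 num2 _
  unfold Spec_is_permuted
  rw [Bool.eq_iff_iff, is_permuted_iff_perm]
  unfold is_permuted_alt
  rw [beq_iff_eq, PySem.List.sorted_id_eq_sorted_id_iff_perm]
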